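-- pv_equiv track=rewrite | github.com/TisaneFruitRouge/dssmith-planning | planning.py | classe_liste_employes
-- ===== SOURCE A (Python) =====
-- def classe_liste_employes(liste_employes):
-- 	"""
-- 		Cette fonction renvoie une liste composée des éléments de la list donnée en entrée, mais triés en
-- 		fonction de leur niveau de compétence
-- 	"""
-- 	l_1 = []
-- 	l_2 = []
-- 	l_3 = []
-- 	l_4 = []
-- 	for e in liste_employes:
-- 		if e[1] == 1:
-- 			l_1.append(e)
-- 		elif e[1] == 2:
-- 			l_2.append(e)
-- 		elif e[1] == 3:
-- 			l_3.append(e)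
-- 		elif e[1] == 4:
-- 			l_4.append(e)
--
-- 	return l_4+l_3+l_2+l_1
-- ===== SOURCE B (Python) =====
-- def classe_liste_employes(liste_employes):
--     return [e for k in (4, 3, 2, 1) for e in liste_employes if e[1] == k]
-- ===== Notes on version B (the rewrite author's own statement) =====
-- stated objective: simpler
-- what changed: Replaces the single bucketing pass with four explicit accumulator lists by one comprehension that, for each level 4..1 in turn, filters the input for that level and concatenates the results.
import Mathlib
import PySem

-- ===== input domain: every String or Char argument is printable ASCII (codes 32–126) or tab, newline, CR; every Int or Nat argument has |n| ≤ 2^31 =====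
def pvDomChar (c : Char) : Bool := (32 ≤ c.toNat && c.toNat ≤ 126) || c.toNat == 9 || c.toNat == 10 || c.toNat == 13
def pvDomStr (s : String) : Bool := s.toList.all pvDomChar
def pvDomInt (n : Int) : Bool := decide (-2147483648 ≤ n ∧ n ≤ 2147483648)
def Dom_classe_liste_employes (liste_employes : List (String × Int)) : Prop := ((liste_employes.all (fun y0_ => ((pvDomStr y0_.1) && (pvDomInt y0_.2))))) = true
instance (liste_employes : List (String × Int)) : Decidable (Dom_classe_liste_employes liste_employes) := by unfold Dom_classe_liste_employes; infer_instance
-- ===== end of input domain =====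

-- B: one comprehension filtering the input per level 4..1 instead of a bucketing pass with four accumulators (simpler; same O(n·levels) cost).

-- ===== PORT A =====
-- single pass appending each element to one of four bucket lists, then l_4+l_3+l_2+l_1
def classe_liste_employes (liste_employes : List (String × Int)) : List (String × Int) :=
  let s := liste_employes.foldl
    (fun (acc : List (String × Int) × List (String × Int) × List (String × Int) × List (String × Int)) e =>
      let (l1, l2, l3, l4) := acc
      if e.2 == 1 then (l1 ++ [e], l2, l3, l4)
      else if e.2 == 2 then (l1, l2 ++ [e], l3, l4)
      else if e.2 == 3 then (l1, l2, l3 ++ [e], l4)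
      else if e.2 == 4 then (l1, l2, l3, l4 ++ [e])
      else (l1, l2, l3, l4))
    ([], [], [], [])
  s.2.2.2 ++ s.2.2.1 ++ s.2.1 ++ s.1

-- ===== PORT B =====
-- [e for k in (4,3,2,1) for e in liste_employes if e[1] == k]
def classe_liste_employes_alt (liste_employes : List (String × Int)) : List (String × Int) :=
  ([4, 3, 2, 1] : List Int).flatMap (fun k => liste_employes.filter (fun e => e.2 == k))

-- ===== PRECONDITION & SPEC =====
def Spec_classe_liste_employes (liste_employes : List (String × Int)) (out : List (String × Int)) : Prop := out = classe_liste_employes_alt liste_employes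
instance (liste_employes : List (String × Int)) (out : List (String × Int)) : Decidable (Spec_classe_liste_employes liste_employes out) := by unfold Spec_classe_liste_employes; infer_instance

-- ===== CLAIM (what is proved, stated in full; the proofs are below) =====
def Claim_equal_classe_liste_employes : Prop := ∀ (liste_employes : List (String × Int)), Dom_classe_liste_employes liste_employes → Spec_classe_liste_employes liste_employes (classe_liste_employes liste_employes)

-- ===== LEMMAS AND PROOFS =====

-- invariant: the fold appends the per-level filters to the running buckets
theorem pv_fold_filters (xs : List (String × Int))
    (l1 l2 l3 l4 : List (String × Int)) :
    xs.foldl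
      (fun (acc : List (String × Int) × List (String × Int) × List (String × Int) × List (String × Int)) e =>
        let (l1, l2, l3, l4) := acc
        if e.2 == 1 then (l1 ++ [e], l2, l3, l4)
        else if e.2 == 2 then (l1, l2 ++ [e], l3, l4)
        else if e.2 == 3 then (l1, l2, l3 ++ [e], l4)
        else if e.2 == 4 then (l1, l2, l3, l4 ++ [e])
        else (l1, l2, l3, l4))
      (l1, l2, l3, l4)
    = (l1 ++ xs.filter (fun e => e.2 == 1),
       l2 ++ xs.filter (fun e => e.2 == 2),
       l3 ++ xs.filter (fun e => e.2 == 3),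
       l4 ++ xs.filter (fun e => e.2 == 4)) := by
  induction xs generalizing l1 l2 l3 l4 with
  | nil => simp
  | cons x xs ih =>
    simp only [List.foldl_cons, List.filter_cons]
    by_cases h1 : x.2 == 1 <;> by_cases h2 : x.2 == 2 <;> by_cases h3 : x.2 == 3 <;>
      by_cases h4 : x.2 == 4 <;>
      simp_all [List.append_assoc]

-- ===== VERDICT (by name: the statement is the Claim_ definition above) =====
theorem classe_liste_employes_spec : Claim_equal_classe_liste_employes := by
  intro xs _
  unfold Spec_classe_liste_employes classe_liste_employes classe_liste_employes_alt
  rw [pv_fold_filters]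
  simp
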